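-- pv_equiv track=rewrite | github.com/dburns94/network_mapping | networking.py | wildcard_to_prefix
-- ===== SOURCE A (Python) =====
-- def ipv4_to_dec(address):
-- # converts an IPv4 address to decimal
--     decIP = 0
--     # seperate the IP from prefix
--     ip = address.split("/")
--     # get each byte/octet
--     octets = ip[0].split(".")
--     # add each octets value to decIP
--     for i in range(len(octets)):
--         value = int(octets[i])
--         decIP += (value<<(24-8*i))
--     return decIP
--
-- def wildcard_to_prefix(wildcard):
-- # converts an IPv4 wildcard mask to and IPv4 prefix (i.e. 0.0.0.255 to /24)
--     prefix = 32
--     # calculate the decimal value of the IP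
--     decIP = ipv4_to_dec(wildcard)
--     # loop over each bit, finding the last 0
--     foundOne = False
--     for i in range(1,33):
--         # calculate the binary value of the bit
--         value = (decIP>>(32-i))&1
--         # if the value is a 1
--         if value:
--             # if this is the first 1 found
--             if not(foundOne):
--                 # set the prefix length
--                 prefix = i - 1
--                 foundOne = True
--         # if a binary value of 0 was found
--         else:
--             # if a 1 has already been found
--             if foundOne:
--                 # this is not a valid wildcard mask
--                 prefix = -1
--                 break
--     return prefix
-- ===== SOURCE B (Python) =====
-- def ipv4_to_dec(address):
-- # converts an IPv4 address to decimal
--     decIP = 0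
--     ip = address.split("/")
--     octets = ip[0].split(".")
--     for i in range(len(octets)):
--         value = int(octets[i])
--         decIP += (value<<(24-8*i))
--     return decIP
--
-- def wildcard_to_prefix(wildcard):
-- # converts an IPv4 wildcard mask to an IPv4 prefix, by closed form:
-- # the low 32 bits must be a contiguous run of ones 2**k - 1; then prefix = 32 - k
--     m = ipv4_to_dec(wildcard) % 0x100000000
--     L = m.bit_length()
--     return 32 - L if m == (1 << L) - 1 else -1
-- ===== Notes on version B (the rewrite author's own statement) =====
-- stated objective: simpler
-- what changed: Replaces A's 32-iteration MSB-to-LSB bit scan with break/flag state by a closed-form test on the low 32 bits: a valid wildcard is m == 2**L - 1 for L = m.bit_length(), giving prefix 32 - L, else -1.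
import Mathlib
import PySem

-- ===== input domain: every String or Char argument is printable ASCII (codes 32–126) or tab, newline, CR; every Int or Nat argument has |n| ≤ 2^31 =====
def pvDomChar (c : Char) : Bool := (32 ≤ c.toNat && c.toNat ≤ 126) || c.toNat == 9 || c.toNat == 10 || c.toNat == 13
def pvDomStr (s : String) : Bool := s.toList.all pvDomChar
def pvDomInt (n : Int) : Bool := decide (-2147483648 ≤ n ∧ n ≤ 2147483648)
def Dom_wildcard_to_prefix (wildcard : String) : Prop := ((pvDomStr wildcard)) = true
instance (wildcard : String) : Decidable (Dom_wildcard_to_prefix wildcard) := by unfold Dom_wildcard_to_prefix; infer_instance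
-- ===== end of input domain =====

-- B replaces A's 32-step MSB-to-LSB bit scan by a closed form: the low 32 bits must be 2^k - 1,
-- checked via bit_length; objective: simpler (equal return value on every input where A returns).

-- ===== PORT A =====
-- shared helper: port of ipv4_to_dec (used verbatim by both A and B in Python).
-- split? is `some` here because both separators are nonempty; int() failure and a 5th octet
-- (Python: negative shift count -> ValueError) are excluded by Pre_, so `getD 0` and the
-- truncated Nat subtraction 24 - 8*i are exact on the admitted inputs.
def pvIpv4ToDec (address : String) : Int :=
  let ip := (PySem.Str.split? address "/").getD []
  let octets := (PySem.Str.split? (ip.headD "") ".").getD []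
  (List.range octets.length).foldl
    (fun decIP i =>
      decIP + ((PySem.Int.ofStr? (octets.getD i "")).getD 0 <<< (24 - 8 * i))) 0

-- A: loop i = 1..32 over the bits of decIP from MSB to LSB; state = (prefix, foundOne, broke)
def wildcard_to_prefix (wildcard : String) : Int :=
  let decIP := pvIpv4ToDec wildcard
  ((PySem.List.pyRange 1 33).foldl
    (fun (s : Int × Bool × Bool) (i : Int) =>
      if s.2.2 then s else   -- Python `break` modelled by the `broke` flag
      let value := PySem.Int.band (decIP >>> (32 - i).toNat) 1
      if value ≠ 0 then
        (if !s.2.1 then (i - 1, true, s.2.2) else s)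
      else
        (if s.2.1 then (-1, s.2.1, true) else s))
    ((32 : Int), false, false)).1

-- ===== PORT B =====
def wildcard_to_prefix_alt (wildcard : String) : Int :=
  let m := PySem.Int.mod (pvIpv4ToDec wildcard) 4294967296
  let L := PySem.Int.bitLength m
  if m = (1 <<< L) - 1 then 32 - (L : Int) else -1

-- ===== PRECONDITION & SPEC =====
-- Pre_: exactly the inputs on which Python A returns: every dot-separated piece of the part
-- before the slash parses with int(), and there are at most 4 pieces (a 5th gives a negative shift
-- count, ValueError).
def Pre_wildcard_to_prefix (wildcard : String) : Prop :=
  let octets := (PySem.Str.split? ((((PySem.Str.split? wildcard "/").getD []).headD "")) ".").getD []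
  octets.length ≤ 4 ∧ ∀ o ∈ octets, (PySem.Int.ofStr? o).isSome = true
instance (wildcard : String) : Decidable (Pre_wildcard_to_prefix wildcard) := by
  unfold Pre_wildcard_to_prefix; infer_instance
def pvWitness_wildcard_to_prefix : String := "0.0.0.255"

def Spec_wildcard_to_prefix (wildcard : String) (out : Int) : Prop := out = wildcard_to_prefix_alt wildcard
instance (wildcard : String) (out : Int) : Decidable (Spec_wildcard_to_prefix wildcard out) := by unfold Spec_wildcard_to_prefix; infer_instance

-- ===== CLAIM (what is proved, stated in full; the proofs are below) =====
def Claim_equal_wildcard_to_prefix : Prop := ∀ (wildcard : String), Dom_wildcard_to_prefix wildcard → Pre_wildcard_to_prefix wildcard → Spec_wildcard_to_prefix wildcard (wildcard_to_prefix wildcard)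

-- ===== LEMMAS AND PROOFS =====

-- A's loop body, abstracted over the integer whose bits are scanned
def pvStep (d : Int) (s : Int × Bool × Bool) (i : Int) : Int × Bool × Bool :=
  if s.2.2 then s else
  let value := PySem.Int.band (d >>> (32 - i).toNat) 1
  if value ≠ 0 then
    (if !s.2.1 then (i - 1, true, s.2.2) else s)
  else
    (if s.2.1 then (-1, s.2.1, true) else s)

theorem pvPortA_eq (w : String) :
    wildcard_to_prefix w
      = ((PySem.List.pyRange 1 33).foldl (pvStep (pvIpv4ToDec w)) ((32 : Int), false, false)).1 := rfl

-- the scanned bit equals the corresponding bit of the low 32 bits of d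
theorem pvBit_eq (d : Int) (i : Int) (h1 : 1 ≤ i) (h2 : i ≤ 32) :
    PySem.Int.band (d >>> (32 - i).toNat) 1
      = (if (PySem.Int.mod d 4294967296).toNat.testBit (32 - i).toNat then 1 else 0) := by
  set k := (32 - i).toNat with hkdef
  have hk31 : k ≤ 31 := by omega
  rw [PySem.Int.band_one, PySem.Int.mod_eq_emod_of_pos (by norm_num),
    PySem.Int.mod_eq_emod_of_pos (by norm_num), Int.shiftRight_eq_div_pow]
  push_cast
  set r := d % 4294967296 with hrdef
  have hr0 : 0 ≤ r := Int.emod_nonneg d (by norm_num)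
  have hpow : (2:Int)^(32-k) * 2^k = 4294967296 := by
    rw [← pow_add, Nat.sub_add_cancel (by omega)]; norm_num
  have hd : d = r + (d / 4294967296 * 2^(32-k)) * 2^k := by
    have := Int.mul_ediv_add_emod d 4294967296
    rw [mul_assoc, hpow]; omega
  have hstep1 : d / 2^k = r / 2^k + d / 4294967296 * 2^(32-k) := by
    conv_lhs => rw [hd]
    exact Int.add_mul_ediv_right _ _ (by positivity)
  have hstep2 : d / 2^k % 2 = r / 2^k % 2 := by
    have h2d : d / 4294967296 * 2^(32-k) = 2 * (d / 4294967296 * 2^(31-k)) := by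
      have h22 : (2:Int)^(32-k) = 2 * 2^(31-k) := by
        rw [← pow_succ']; congr 1; omega
      rw [h22]; ring
    omega
  rw [hstep2]
  have hcast : r / (2:Int)^k % 2 = ((r.toNat / 2^k % 2 : Nat) : Int) := by
    conv_lhs => rw [← Int.toNat_of_nonneg hr0]
    push_cast [Int.natCast_div]
    rfl
  rw [hcast, Nat.testBit_eq_decide_div_mod_eq]
  by_cases h : r.toNat / 2^k % 2 = 1
  · simp [h]
  · have hlt : r.toNat / 2^k % 2 < 2 := Nat.mod_lt _ (by norm_num)
    have h0 : r.toNat / 2^k % 2 = 0 := by omega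
    simp [h0]

-- once broke, the state is frozen
theorem pvStep_done (d : Int) (l : List Int) (p : Int) (f : Bool) :
    l.foldl (pvStep d) (p, f, true) = (p, f, true) := by
  induction l with
  | nil => rfl
  | cons a t ih => simpa [pvStep] using ih

theorem pvStep_zeros (d : Int) (l : List Int) (p : Int)
    (h : ∀ i ∈ l, PySem.Int.band (d >>> (32 - i).toNat) 1 = 0) :
    l.foldl (pvStep d) (p, false, false) = (p, false, false) := by
  induction l with
  | nil => rfl
  | cons a t ih =>
      have ha := h a (List.mem_cons_self ..)
      simp only [List.foldl_cons, pvStep, ha]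
      simpa using ih (fun i hi => h i (List.mem_cons_of_mem _ hi))

theorem pvStep_ones (d : Int) (l : List Int) (p : Int)
    (h : ∀ i ∈ l, PySem.Int.band (d >>> (32 - i).toNat) 1 ≠ 0) :
    l.foldl (pvStep d) (p, true, false) = (p, true, false) := by
  induction l with
  | nil => rfl
  | cons a t ih =>
      have ha := h a (List.mem_cons_self ..)
      simp only [List.foldl_cons, pvStep]
      simpa [ha] using ih (fun i hi => h i (List.mem_cons_of_mem _ hi))

theorem pvStep_hitzero (d : Int) (l : List Int) (p : Int)
    (h : ∃ i ∈ l, PySem.Int.band (d >>> (32 - i).toNat) 1 = 0) :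
    (l.foldl (pvStep d) (p, true, false)).1 = -1 := by
  induction l generalizing p with
  | nil => simp at h
  | cons a t ih =>
      by_cases ha : PySem.Int.band (d >>> (32 - a).toNat) 1 = 0
      · simp [List.foldl_cons, pvStep, ha, pvStep_done]
      · obtain ⟨i, hi, hiz⟩ := h
        rcases List.mem_cons.mp hi with rfl | hit
        · exact absurd hiz ha
        · simp only [List.foldl_cons, pvStep]
          simpa [ha] using ih p ⟨i, hit, hiz⟩

-- the core: A's bit scan equals B's closed form, for every integer d
theorem pvLoop_eq_closed (d : Int) :
    ((PySem.List.pyRange 1 33).foldl (pvStep d) ((32 : Int), false, false)).1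
      = (if PySem.Int.mod d 4294967296 = (1 <<< PySem.Int.bitLength (PySem.Int.mod d 4294967296)) - 1
         then 32 - (PySem.Int.bitLength (PySem.Int.mod d 4294967296) : Int) else -1) := by
  have hm0 : 0 ≤ PySem.Int.mod d 4294967296 := PySem.Int.mod_nonneg d (by norm_num)
  have hmlt : PySem.Int.mod d 4294967296 < 4294967296 := PySem.Int.mod_lt d (by norm_num)
  obtain ⟨n, hmn⟩ : ∃ n : Nat, PySem.Int.mod d 4294967296 = (n : Int) :=
    ⟨_, (Int.toNat_of_nonneg hm0).symm⟩
  have hn32 : n < 2^32 := by omega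
  have hbit : ∀ i : Int, 1 ≤ i → i ≤ 32 →
      PySem.Int.band (d >>> (32 - i).toNat) 1 = (if n.testBit (32 - i).toNat then 1 else 0) := by
    intro i h1 h2
    rw [pvBit_eq d i h1 h2, hmn, Int.toNat_natCast]
  rw [hmn]
  set L := PySem.Int.bitLength (n : Int) with hL
  have hshift : (1:Int) <<< L = 2^L := by simp [Int.shiftLeft_eq]
  by_cases hz : n = 0
  · rw [pvStep_zeros d _ _ ?_]
    · have hL0 : L = 0 := by rw [hL, hz]; exact PySem.Int.bitLength_zero
      rw [hz, hL0]
      norm_num [Int.shiftLeft_eq]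
    · intro i hi
      obtain ⟨hi1, hi2⟩ := PySem.List.mem_pyRange_one.mp hi
      rw [hbit i hi1 (by omega), hz]
      simp
  · have hL1 : n < 2^L := by
      have h := PySem.Int.lt_two_pow_bitLength (n : Int)
      rwa [Int.natAbs_natCast] at h
    have hL2 : 2^(L-1) ≤ n := by
      have h := PySem.Int.two_pow_bitLength_le (n : Int) (by exact_mod_cast hz)
      rwa [Int.natAbs_natCast] at h
    have hLpos : 1 ≤ L := by
      rcases Nat.eq_zero_or_pos L with h | h
      · rw [h] at hL1; omega
      · exact h
    have hL32 : L ≤ 32 := by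
      by_contra h
      have h33 : 32 ≤ L - 1 := by omega
      have : 2^32 ≤ 2^(L-1) := Nat.pow_le_pow_right (by norm_num) h33
      omega
    have h2L : 2^L = 2^(L-1) * 2 := by
      rw [← pow_succ]; congr 1; omega
    have htop : n.testBit (L-1) = true := by
      have hdiv : n / 2^(L-1) = 1 := by
        apply Nat.div_eq_of_lt_le (by omega)
        omega
      rw [Nat.testBit_eq_decide_div_mod_eq, hdiv]
      norm_num
    have hsplit : PySem.List.pyRange 1 33
        = PySem.List.pyRange 1 (33 - L) ++ (33 - (L:Int)) :: PySem.List.pyRange (34 - L) 33 := by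
      rw [PySem.List.pyRange_one_append 1 (33 - L) 33 (by omega) (by omega),
        PySem.List.pyRange_one_cons (by omega : (33 - (L:Int)) < 33)]
      norm_num
      congr 1
      omega
    rw [hsplit, List.foldl_append, pvStep_zeros d _ _ ?_]
    · -- step at 33 - L : the first 1-bit is found, prefix becomes 32 - L
      have hk : ((32 : Int) - (33 - (L:Int))).toNat = L - 1 := by omega
      have hval : PySem.Int.band (d >>> ((32 : Int) - (33 - (L:Int))).toNat) 1 = 1 := by
        rw [hbit _ (by omega) (by omega), hk, htop]
        simp
      simp only [List.foldl_cons, pvStep, hval]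
      norm_num
      have h1L : (1:Nat) ≤ 2^L := Nat.one_le_two_pow
      have hcastL : ((2^L - 1 : Nat) : Int) = 2^L - 1 := by push_cast [h1L]; ring
      by_cases hpow2 : n = 2^L - 1
      · rw [pvStep_ones d _ _ ?_]
        · simp only []
          rw [if_pos (by rw [hshift, hpow2]; exact hcastL)]
          omega
        · intro i hi
          obtain ⟨hi1, hi2⟩ := PySem.List.mem_pyRange_one.mp hi
          rw [hbit i (by omega) (by omega)]
          have : n.testBit ((32 - i).toNat) = true := by
            rw [hpow2, Nat.testBit_two_pow_sub_one]
            simp; omega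
          simp [this]
      · rw [if_neg (by
          rw [hshift]
          intro hcon
          exact hpow2 (Nat.cast_injective (hcon.trans hcastL.symm)))]
        apply pvStep_hitzero
        have hnall : ¬ ∀ j, n.testBit j = (2^L - 1).testBit j :=
          fun hc => hpow2 (Nat.eq_of_testBit_eq hc)
        obtain ⟨j, hj⟩ := not_forall.mp hnall
        rw [Nat.testBit_two_pow_sub_one] at hj
        have hjL : j < L := by
          by_contra hge
          apply hj
          rw [Nat.testBit_lt_two_pow (lt_of_lt_of_le hL1 (Nat.pow_le_pow_right (by norm_num) (by omega)))]
          simp; omega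
        have hjf : n.testBit j = false := by
          rcases Bool.eq_false_or_eq_true (n.testBit j) with h | h
          · exfalso; apply hj; rw [h]; simp [hjL]
          · exact h
        have hjne : j ≠ L - 1 := by intro h; rw [h, htop] at hjf; simp at hjf
        refine ⟨32 - (j:Int), ?_, ?_⟩
        · rw [PySem.List.mem_pyRange_one]; omega
        · rw [hbit _ (by omega) (by omega)]
          have hjj : ((32:Int) - (32 - (j:Int))).toNat = j := by omega
          rw [hjj, hjf]
          simp
    · intro i hi
      obtain ⟨hi1, hi2⟩ := PySem.List.mem_pyRange_one.mp hi
      rw [hbit i hi1 (by omega)]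
      have : n.testBit ((32 - i).toNat) = false := by
        apply Nat.testBit_lt_two_pow
        calc n < 2^L := hL1
        _ ≤ 2^((32 - i).toNat) := Nat.pow_le_pow_right (by norm_num) (by omega)
      simp [this]

-- ===== VERDICT (by name: the statement is the Claim_ definition above) =====
theorem wildcard_to_prefix_spec : Claim_equal_wildcard_to_prefix := by
  intro w _ _
  unfold Spec_wildcard_to_prefix wildcard_to_prefix_alt
  rw [pvPortA_eq, pvLoop_eq_closed]
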